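-- pv_equiv track=rewrite | github.com/Delia95/EGA_OV | EGA_OV.py | checkList
-- ===== SOURCE A (Python) =====
-- def checkList(olist):
--     nextL = 0
--     for i in range(len(olist)):
--         if olist[i] > 1:
--             if i + olist[i] >= nextL:
--                 nextL = i + olist[i]
--             else:
--                 return False
--     return True
-- ===== SOURCE B (Python) =====
-- def checkList(olist):
--     reaches = [i + v for i, v in enumerate(olist) if v > 1]
--     return all(a <= b for a, b in zip(reaches, reaches[1:]))
-- ===== Notes on version B (the rewrite author's own statement) =====
-- stated objective: simpler
-- what changed: Replaces the stateful running-max loop with early return by a two-phase decomposition: first build the list of reach values i+olist[i] at positions with olist[i]>1, then check that this list is pairwise non-decreasing with zip/all.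
import Mathlib
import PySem

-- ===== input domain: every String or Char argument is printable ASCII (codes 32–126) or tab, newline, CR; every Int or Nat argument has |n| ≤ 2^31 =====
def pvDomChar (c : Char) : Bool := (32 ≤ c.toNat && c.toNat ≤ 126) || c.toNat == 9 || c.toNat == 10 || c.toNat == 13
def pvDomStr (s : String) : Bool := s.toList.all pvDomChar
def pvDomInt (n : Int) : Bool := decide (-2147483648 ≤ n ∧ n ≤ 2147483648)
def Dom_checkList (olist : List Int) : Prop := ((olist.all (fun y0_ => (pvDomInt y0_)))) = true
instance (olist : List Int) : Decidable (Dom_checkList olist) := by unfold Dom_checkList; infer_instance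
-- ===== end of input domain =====

-- B replaces A's stateful running-max loop with early return by a two-phase
-- decomposition: build the list of reach values, then check it is pairwise
-- non-decreasing (objective: simpler).

-- ===== PORT A =====
-- A's for-loop with early return: structural recursion over the list carrying
-- the index i and the running value nextL.
def checkListGo : List Int → Int → Int → Bool
  | [], _, _ => true
  | v :: rest, i, nextL =>
    if v > 1 then
      if i + v ≥ nextL then checkListGo rest (i + 1) (i + v)
      else false
    else checkListGo rest (i + 1) nextL

def checkList (olist : List Int) : Bool := checkListGo olist 0 0

-- ===== PORT B =====
-- reaches = [i + v for i, v in enumerate(olist) if v > 1]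
-- return all(a <= b for a, b in zip(reaches, reaches[1:]))
def checkList_alt (olist : List Int) : Bool :=
  let reaches := (PySem.List.enumerate olist).filterMap
    (fun p => if p.2 > 1 then some (p.1 + p.2) else none)
  ((List.zip reaches (PySem.List.slice reaches (some 1) none)).all
    (fun p => p.1 ≤ p.2))

-- ===== PRECONDITION & SPEC =====
def Spec_checkList (olist : List Int) (out : Bool) : Prop := out = checkList_alt olist
instance (olist : List Int) (out : Bool) : Decidable (Spec_checkList olist out) := by unfold Spec_checkList; infer_instance

-- ===== CLAIM (what is proved, stated in full; the proofs are below) =====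
def Claim_equal_checkList : Prop := ∀ (olist : List Int), Dom_checkList olist → Spec_checkList olist (checkList olist)

-- ===== LEMMAS AND PROOFS =====

-- the filtered reach values of olist with indices starting at s
def pvReaches (olist : List Int) (s : Int) : List Int :=
  (PySem.List.enumerate olist s).filterMap
    (fun p => if p.2 > 1 then some (p.1 + p.2) else none)

-- B's pairwise check as a predicate on a plain list
def pvPairOK (xs : List Int) : Bool :=
  (List.zip xs xs.tail).all (fun p => p.1 ≤ p.2)

theorem pvPairOK_cons_cons (a b : Int) (xs : List Int) :
    pvPairOK (a :: b :: xs) = (decide (a ≤ b) && pvPairOK (b :: xs)) := by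
  simp [pvPairOK]

theorem pvReaches_cons (v : Int) (rest : List Int) (s : Int) :
    pvReaches (v :: rest) s =
      if v > 1 then (s + v) :: pvReaches rest (s + 1) else pvReaches rest (s + 1) := by
  simp only [pvReaches, PySem.List.enumerate_cons, List.filterMap_cons]
  split_ifs <;> simp_all

theorem pvReaches_pos (olist : List Int) (s : Int) (hs : 0 ≤ s) :
    ∀ w ∈ pvReaches olist s, 0 ≤ w := by
  induction olist generalizing s with
  | nil => simp [pvReaches, PySem.List.enumerate_nil]
  | cons v rest ih =>
    intro w hw
    rw [pvReaches_cons] at hw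
    split_ifs at hw with hv
    · rcases List.mem_cons.mp hw with h | h
      · omega
      · exact ih (s + 1) (by omega) w h
    · exact ih (s + 1) (by omega) w hw

-- the loop with state nextL equals the pairwise check of nextL prefixed to the reaches
theorem checkListGo_eq (olist : List Int) (s nextL : Int) :
    checkListGo olist s nextL = pvPairOK (nextL :: pvReaches olist s) := by
  induction olist generalizing s nextL with
  | nil => simp [checkListGo, pvReaches, PySem.List.enumerate_nil, pvPairOK]
  | cons v rest ih =>
    rw [checkListGo, pvReaches_cons]
    split_ifs with hv hge
    · rw [ih, pvPairOK_cons_cons]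
      simp [hge]
    · rw [pvPairOK_cons_cons]
      simp [hge]
    · exact ih (s + 1) nextL

-- ===== VERDICT (by name: the statement is the Claim_ definition above) =====
theorem checkList_spec : Claim_equal_checkList := by
  intro olist _
  show checkList olist = checkList_alt olist
  have halt : checkList_alt olist = pvPairOK (pvReaches olist 0) := by
    simp [checkList_alt, pvPairOK, pvReaches, PySem.List.slice_from_one]
  rw [halt, checkList, checkListGo_eq]
  cases h : pvReaches olist 0 with
  | nil => simp [pvPairOK]
  | cons w ws =>
    rw [pvPairOK_cons_cons]
    have hw : 0 ≤ w := pvReaches_pos olist 0 le_rfl w (by rw [h]; exact List.mem_cons_self ..)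
    simp [hw]
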